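-- pv_equiv track=rewrite | github.com/mk12002/HybEx-Law | only_1 domain/expand_data.py | _modify_facts_for_income
-- ===== SOURCE A (Python) =====
-- from typing import List, Dict, Any
--
-- def _modify_facts_for_income(original_facts: List[str], income_category: str) -> List[str]:
--     """Modify facts based on income category."""
--
--     new_facts = []
--
--     for fact in original_facts:
--         if 'income_monthly(user,' in fact:
--             # Replace with new income based on category
--             if income_category == 'unemployed':
--                 new_facts.append('income_monthly(user, 0)')
--             elif income_category == 'low_income':
--                 new_facts.append('income_monthly(user, 12000)')
--             elif income_category == 'moderate_income':
--                 new_facts.append('income_monthly(user, 25000)')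
--             elif income_category == 'above_threshold':
--                 new_facts.append('income_monthly(user, 60000)')
--         else:
--             new_facts.append(fact)
--
--     # Add income fact if not present
--     if not any('income_monthly(user,' in fact for fact in new_facts):
--         if income_category == 'unemployed':
--             new_facts.append('income_monthly(user, 0)')
--         elif income_category == 'low_income':
--             new_facts.append('income_monthly(user, 12000)')
--         elif income_category == 'moderate_income':
--             new_facts.append('income_monthly(user, 25000)')
--         elif income_category == 'above_threshold':
--             new_facts.append('income_monthly(user, 60000)')
--
--     return new_facts
-- ===== SOURCE B (Python) =====
-- def _modify_facts_for_income(original_facts, income_category):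
--     income_map = {
--         'unemployed': 'income_monthly(user, 0)',
--         'low_income': 'income_monthly(user, 12000)',
--         'moderate_income': 'income_monthly(user, 25000)',
--         'above_threshold': 'income_monthly(user, 60000)',
--     }
--     new_income = income_map.get(income_category)
--     result = []
--     saw_income = False
--     for fact in original_facts:
--         if 'income_monthly(user,' in fact:
--             saw_income = True
--             if new_income is not None:
--                 result.append(new_income)
--         else:
--             result.append(fact)
--     if new_income is not None and not saw_income:
--         result.append(new_income)
--     return result
-- ===== Notes on version B (the rewrite author's own statement) =====
-- stated objective: simpler
-- what changed: B resolves the four-way category chain once via a dict lookup and replaces A's second full scan of the built list with a saw_income flag maintained in a single pass.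
import Mathlib
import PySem

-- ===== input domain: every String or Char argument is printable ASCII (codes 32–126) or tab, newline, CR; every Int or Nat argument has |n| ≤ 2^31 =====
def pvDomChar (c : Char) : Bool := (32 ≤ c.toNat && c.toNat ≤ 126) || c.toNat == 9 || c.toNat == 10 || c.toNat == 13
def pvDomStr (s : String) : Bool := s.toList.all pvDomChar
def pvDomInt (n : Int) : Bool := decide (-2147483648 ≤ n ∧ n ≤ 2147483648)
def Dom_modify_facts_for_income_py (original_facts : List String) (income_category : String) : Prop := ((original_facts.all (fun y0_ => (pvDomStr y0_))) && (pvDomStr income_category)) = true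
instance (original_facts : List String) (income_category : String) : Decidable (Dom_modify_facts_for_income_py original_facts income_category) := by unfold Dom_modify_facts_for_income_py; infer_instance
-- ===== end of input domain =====

-- ===== PORT A =====
-- B replaces A's repeated four-way if/elif chains by one dict lookup and A's trailing any() rescan
-- of the built list by a saw_income flag kept during a single pass (objective: simpler).
def modify_facts_for_income_py (original_facts : List String) (income_category : String) : List String :=
  let new_facts :=
    original_facts.foldl (fun nf fact =>
      if PySem.Str.isIn "income_monthly(user," fact then
        if income_category == "unemployed" then nf ++ ["income_monthly(user, 0)"]
        else if income_category == "low_income" then nf ++ ["income_monthly(user, 12000)"]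
        else if income_category == "moderate_income" then nf ++ ["income_monthly(user, 25000)"]
        else if income_category == "above_threshold" then nf ++ ["income_monthly(user, 60000)"]
        else nf
      else nf ++ [fact]) []
  if ¬ (new_facts.any (fun fact => PySem.Str.isIn "income_monthly(user," fact)) then
    if income_category == "unemployed" then new_facts ++ ["income_monthly(user, 0)"]
    else if income_category == "low_income" then new_facts ++ ["income_monthly(user, 12000)"]
    else if income_category == "moderate_income" then new_facts ++ ["income_monthly(user, 25000)"]
    else if income_category == "above_threshold" then new_facts ++ ["income_monthly(user, 60000)"]
    else new_facts
  else new_facts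


-- ===== PORT B =====
def pvIncomeMap : PySem.Dict String String :=
  PySem.Dict.ofList [("unemployed", "income_monthly(user, 0)"),
                     ("low_income", "income_monthly(user, 12000)"),
                     ("moderate_income", "income_monthly(user, 25000)"),
                     ("above_threshold", "income_monthly(user, 60000)")]
def modify_facts_for_income_py_alt (original_facts : List String) (income_category : String) : List String :=
  let new_income := PySem.Dict.get? pvIncomeMap income_category
  let st :=
    original_facts.foldl (fun (st : List String × Bool) fact =>
      if PySem.Str.isIn "income_monthly(user," fact then
        (match new_income with
         | some v => (st.1 ++ [v], true)
         | none => (st.1, true))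
      else (st.1 ++ [fact], st.2)) ([], false)
  if new_income.isSome && !st.2 then st.1 ++ [new_income.getD ""] else st.1


-- ===== PRECONDITION & SPEC =====
def Spec_modify_facts_for_income_py (original_facts : List String) (income_category : String) (out : List String) : Prop := out = modify_facts_for_income_py_alt original_facts income_category
instance (original_facts : List String) (income_category : String) (out : List String) : Decidable (Spec_modify_facts_for_income_py original_facts income_category out) := by unfold Spec_modify_facts_for_income_py; infer_instance

-- ===== CLAIM (what is proved, stated in full; the proofs are below) =====
def Claim_equal_modify_facts_for_income_py : Prop := ∀ (original_facts : List String) (income_category : String), Dom_modify_facts_for_income_py original_facts income_category → Spec_modify_facts_for_income_py original_facts income_category (modify_facts_for_income_py original_facts income_category)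

-- ===== LEMMAS AND PROOFS =====
theorem pv_items : pvIncomeMap = ⟨[("unemployed", "income_monthly(user, 0)"),
                     ("low_income", "income_monthly(user, 12000)"),
                     ("moderate_income", "income_monthly(user, 25000)"),
                     ("above_threshold", "income_monthly(user, 60000)")]⟩ := by decide

theorem pv_chain_eq (cat : String) (acc : List String) :
    (if cat == "unemployed" then acc ++ ["income_monthly(user, 0)"]
     else if cat == "low_income" then acc ++ ["income_monthly(user, 12000)"]
     else if cat == "moderate_income" then acc ++ ["income_monthly(user, 25000)"]
     else if cat == "above_threshold" then acc ++ ["income_monthly(user, 60000)"]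
     else acc)
    = acc ++ (PySem.Dict.get? pvIncomeMap cat).toList := by
  rw [pv_items]
  simp only [PySem.Dict.get?, List.find?]
  split_ifs with h1 h2 h3 h4 <;> simp_all [BEq.comm]
  rw [show (cat == "unemployed") = false by simp [h1],
      show (cat == "low_income") = false by simp [h2],
      show (cat == "moderate_income") = false by simp [h3],
      show (cat == "above_threshold") = false by simp [h4]]

theorem pv_lookup_isIn (cat v : String) (h : PySem.Dict.get? pvIncomeMap cat = some v) :
    PySem.Str.isIn "income_monthly(user," v = true := by
  rw [pv_items] at h
  simp only [PySem.Dict.get?, List.find?] at h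
  rcases h1 : ("unemployed" == cat) <;> rcases h2 : ("low_income" == cat) <;>
    rcases h3 : ("moderate_income" == cat) <;> rcases h4 : ("above_threshold" == cat) <;>
    simp_all <;> (subst h <;> decide)

theorem pv_fold_eq (cat : String) (facts : List String) (acc : List String) (saw : Bool) :
    facts.foldl (fun (st : List String × Bool) fact =>
      if PySem.Str.isIn "income_monthly(user," fact then
        (match PySem.Dict.get? pvIncomeMap cat with
         | some v => (st.1 ++ [v], true)
         | none => (st.1, true))
      else (st.1 ++ [fact], st.2)) (acc, saw)
    = (facts.foldl (fun nf fact =>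
        if PySem.Str.isIn "income_monthly(user," fact then
          if cat == "unemployed" then nf ++ ["income_monthly(user, 0)"]
          else if cat == "low_income" then nf ++ ["income_monthly(user, 12000)"]
          else if cat == "moderate_income" then nf ++ ["income_monthly(user, 25000)"]
          else if cat == "above_threshold" then nf ++ ["income_monthly(user, 60000)"]
          else nf
        else nf ++ [fact]) acc,
       saw || facts.any (fun fact => PySem.Str.isIn "income_monthly(user," fact)) := by
  induction facts generalizing acc saw with
  | nil => simp
  | cons f fs ih =>
    simp only [List.foldl_cons, List.any_cons]
    by_cases hf : PySem.Str.isIn "income_monthly(user," f = true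
    · simp only [hf, if_true]
      rw [pv_chain_eq, ih]
      cases hv : PySem.Dict.get? pvIncomeMap cat <;> simp [hv]
    · simp only [Bool.not_eq_true] at hf
      simp only [hf, Bool.false_eq_true, if_false, Bool.false_or, ih]

theorem pv_any_fold (cat : String) (facts : List String) (acc : List String) :
    (facts.foldl (fun nf fact =>
        if PySem.Str.isIn "income_monthly(user," fact then
          if cat == "unemployed" then nf ++ ["income_monthly(user, 0)"]
          else if cat == "low_income" then nf ++ ["income_monthly(user, 12000)"]
          else if cat == "moderate_income" then nf ++ ["income_monthly(user, 25000)"]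
          else if cat == "above_threshold" then nf ++ ["income_monthly(user, 60000)"]
          else nf
        else nf ++ [fact]) acc).any (fun fact => PySem.Str.isIn "income_monthly(user," fact)
    = (acc.any (fun fact => PySem.Str.isIn "income_monthly(user," fact)
       || (facts.any (fun fact => PySem.Str.isIn "income_monthly(user," fact)
           && (PySem.Dict.get? pvIncomeMap cat).isSome)) := by
  induction facts generalizing acc with
  | nil => simp
  | cons f fs ih =>
    simp only [List.foldl_cons, List.any_cons]
    by_cases hf : PySem.Str.isIn "income_monthly(user," f = true
    · simp only [hf, if_true]
      rw [pv_chain_eq, ih]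
      cases hv : PySem.Dict.get? pvIncomeMap cat with
      | none => simp [hv]
      | some v =>
        have hvin := pv_lookup_isIn cat v hv
        simp
        exact Or.inl (Or.inr (by simpa using hvin))
    · simp only [Bool.not_eq_true] at hf
      simp only [hf, Bool.false_eq_true, if_false, Bool.false_or, ih]
      simp only [List.any_append, List.any_cons, List.any_nil, hf, Bool.or_false]


-- ===== VERDICT (by name: the statement is the Claim_ definition above) =====
theorem modify_facts_for_income_py_spec : Claim_equal_modify_facts_for_income_py := by
  intro facts cat _
  unfold Spec_modify_facts_for_income_py
  unfold modify_facts_for_income_py modify_facts_for_income_py_alt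
  show _ = (if _ then _ else _)
  rw [pv_fold_eq]
  simp only [Bool.false_or]
  rw [pv_any_fold]
  simp only [List.any_nil, Bool.false_or]
  rw [pv_chain_eq]
  cases hv : PySem.Dict.get? pvIncomeMap cat with
  | none => simp [hv]
  | some v =>
    by_cases hany : facts.any (fun fact => PySem.Str.isIn "income_monthly(user," fact) = true <;>
      simp [hv, hany]
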